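-- pv_equiv track=rewrite | github.com/joeyscl/Programming_Challenges | Sorting & Searching/longestZeroOneSequence.py | longestSeq
-- ===== SOURCE A (Python) =====
-- def longestSeq(string):
--
-- 	count = 0
-- 	fromLeft = 0
-- 	for i in range(len(string)):
-- 		if string[i] == '0':
-- 			count -= 1
-- 		else:
-- 			count += 1
--
-- 		if count == 0:
-- 			fromLeft = i
--
-- 	count = 0
-- 	fromRight = len(string)
-- 	for i in range(len(string))[::-1]:
-- 		if string[i] == '0':
-- 			count -= 1
-- 		else:
-- 			count += 1
--
-- 		if count == 0:
-- 			fromRight = i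
--
-- 	if fromLeft+1 > len(string)-fromRight:
-- 		return string[:fromLeft+1]
-- 	else:
-- 		return string[fromRight:]
-- ===== SOURCE B (Python) =====
-- def longestSeq(string):
--     n = len(string)
--     bal = 0
--     first = {}          # first index at which each running balance occurs
--     prefixLen = 1
--     for k, ch in enumerate(string):
--         first.setdefault(bal, k)
--         bal = bal - 1 if ch == '0' else bal + 1
--         if bal == 0:
--             prefixLen = k + 1
--     start = first.get(bal, n)
--     if prefixLen > n - start:
--         return string[:prefixLen]
--     return string[start:]
-- ===== Notes on version B (the rewrite author's own statement) =====
-- stated objective: alternative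
-- what changed: Replaces A's two index-based scans (a forward pass for the longest balanced prefix and a reversed-range pass for the longest balanced suffix) by one forward pass that keeps a running balance, a dict of the first index of each balance value (the suffix start is the first index where the balance equals the final total) and the last index where the balance is zero.
import Mathlib
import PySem

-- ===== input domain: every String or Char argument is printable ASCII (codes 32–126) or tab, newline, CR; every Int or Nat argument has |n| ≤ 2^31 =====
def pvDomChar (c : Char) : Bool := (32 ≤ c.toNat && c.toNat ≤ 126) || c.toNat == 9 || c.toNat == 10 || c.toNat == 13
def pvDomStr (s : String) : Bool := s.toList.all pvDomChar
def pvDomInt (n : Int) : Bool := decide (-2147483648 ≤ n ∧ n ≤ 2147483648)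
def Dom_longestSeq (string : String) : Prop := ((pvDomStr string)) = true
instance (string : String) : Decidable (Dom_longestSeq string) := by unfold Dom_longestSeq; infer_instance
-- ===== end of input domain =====

-- B replaces A's two scans (forward for the balanced prefix, reversed-range for the balanced
-- suffix) by one forward pass with a running balance and a first-occurrence dict (alternative).

-- ===== PORT A =====
def longestSeq (string : String) : String :=
  let n : Int := PySem.Str.len string
  let st1 := (PySem.List.pyRange 0 n 1).foldl
    (fun (st : Int × Int) i =>
      let count := if PySem.Str.pyGet? string i = some '0' then st.1 - 1 else st.1 + 1
      (count, if count = 0 then i else st.2))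
    (0, 0)
  -- range(len(string))[::-1] : the [::-1] slice of the range list
  let st2 := ((PySem.List.slice? (PySem.List.pyRange 0 n 1) none none (-1)).getD []).foldl
    (fun (st : Int × Int) i =>
      let count := if PySem.Str.pyGet? string i = some '0' then st.1 - 1 else st.1 + 1
      (count, if count = 0 then i else st.2))
    (0, n)
  if st1.2 + 1 > n - st2.2 then PySem.Str.slice string none (some (st1.2 + 1))
  else PySem.Str.slice string (some st2.2) none

-- ===== PORT B =====
def longestSeq_alt (string : String) : String :=
  let n : Int := PySem.Str.len string
  let st := (PySem.List.enumerate string.toList 0).foldl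
    (fun (st : Int × PySem.Dict Int Int × Int) kc =>
      let first := PySem.Dict.setdefault st.2.1 st.1 kc.1
      let bal := if kc.2 = '0' then st.1 - 1 else st.1 + 1
      (bal, first, if bal = 0 then kc.1 + 1 else st.2.2))
    (0, PySem.Dict.empty, 1)
  let start := PySem.Dict.getD st.2.1 st.1 n
  if st.2.2 > n - start then PySem.Str.slice string none (some st.2.2)
  else PySem.Str.slice string (some start) none

-- ===== PRECONDITION & SPEC =====
def Spec_longestSeq (string : String) (out : String) : Prop := out = longestSeq_alt string
instance (string : String) (out : String) : Decidable (Spec_longestSeq string out) := by unfold Spec_longestSeq; infer_instance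

-- ===== CLAIM (what is proved, stated in full; the proofs are below) =====
def Claim_equal_longestSeq : Prop := ∀ (string : String), Dom_longestSeq string → Spec_longestSeq string (longestSeq string)

-- ===== LEMMAS AND PROOFS =====

/-- Value of one character in the running balance: '0' counts -1, anything else +1 (as in A). -/
def pvVal (c : Char) : Int := if c = '0' then -1 else 1

/-- Balance of a whole character list. -/
def pvTotal (cs : List Char) : Int := (cs.map pvVal).sum

/-- Last index i (0-based) such that the prefix cs[0..i] has balance -t; `none` if there is none. -/
def pvLastZero? : List Char → Int → Option Nat
  | [], _ => none
  | c :: cs, t =>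
    match pvLastZero? cs (t - pvVal c) with
    | some j => some (j + 1)
    | none => if pvVal c = t then some 0 else none

/-- First index k in 0..len-1 such that the prefix cs[0..k-1] has balance t; `none` if there is none. -/
def pvFirstIdx? : List Char → Int → Option Nat
  | [], _ => none
  | c :: cs, t => if t = 0 then some 0 else (pvFirstIdx? cs (t - pvVal c)).map (· + 1)

/-- First index i in 0..len-1 such that the suffix cs[i..] has balance 0; `none` if there is none. -/
def pvSufIdx? : List Char → Option Nat
  | [] => none
  | c :: cs => if pvVal c + pvTotal cs = 0 then some 0 else (pvSufIdx? cs).map (· + 1)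

/-- The body of A's two loops, as a function of the looked-up character. -/
def pvBodyA : (Int × Int) → Int → Option Char → (Int × Int) :=
  fun st i oc =>
    let count := if oc = some '0' then st.1 - 1 else st.1 + 1
    (count, if count = 0 then i else st.2)

/-- The body of B's loop. -/
def pvBodyB : (Int × PySem.Dict Int Int × Int) → (Int × Char) → (Int × PySem.Dict Int Int × Int) :=
  fun st kc =>
    let first := PySem.Dict.setdefault st.2.1 st.1 kc.1
    let bal := if kc.2 = '0' then st.1 - 1 else st.1 + 1
    (bal, first, if bal = 0 then kc.1 + 1 else st.2.2)

/-- A suffix cs[i..] is balanced iff the prefix before i has balance `pvTotal cs`. -/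
theorem pvSufIdx_eq_firstIdx_total (cs : List Char) : pvSufIdx? cs = pvFirstIdx? cs (pvTotal cs) := by
  induction cs with
  | nil => rfl
  | cons c cs ih =>
    simp only [pvSufIdx?, pvFirstIdx?, pvTotal, List.map_cons, List.sum_cons]
    have h1 : pvVal c + (cs.map pvVal).sum - pvVal c = pvTotal cs := by simp [pvTotal]
    rw [h1, ← ih]
    rfl

/-- An index loop over `range(len cs)` reading `cs[i]` is a loop over `enumerate cs`. -/
theorem pv_fold_range_eq_enumerate {σ : Type} (cs : List Char) (f : σ → Int → Option Char → σ) (init : σ) :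
    (PySem.List.pyRange 0 (cs.length : Int) 1).foldl (fun st i => f st i (PySem.List.pyGet? cs i)) init
    = (PySem.List.enumerate cs 0).foldl (fun st kc => f st kc.1 (some kc.2)) init := by
  rw [PySem.List.enumerate_eq_map_pyRange cs 'A', List.foldl_map]
  have hlen : PySem.List.len cs = (cs.length : Int) := by simp [PySem.List.len]
  rw [hlen]
  apply PySem.List.foldl_congr_mem
  intro acc x hx
  rcases PySem.List.mem_pyRange_one.1 hx with ⟨h0, h1⟩
  obtain ⟨m, rfl⟩ : ∃ m : Nat, x = ↑m := ⟨x.toNat, by omega⟩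
  have hm : m < cs.length := by exact_mod_cast h1
  rw [PySem.List.pyGet?_natCast, PySem.List.pyGetD_natCast]
  simp [List.getElem?_eq_getElem, hm, List.getD_eq_getElem?_getD]

/-- The same, for the reversed index loop of A's second pass. -/
theorem pv_fold_range_rev_eq_enumerate {σ : Type} (cs : List Char) (f : σ → Int → Option Char → σ) (init : σ) :
    ((PySem.List.pyRange 0 (cs.length : Int) 1).reverse).foldl (fun st i => f st i (PySem.List.pyGet? cs i)) init
    = ((PySem.List.enumerate cs 0).reverse).foldl (fun st kc => f st kc.1 (some kc.2)) init := by
  rw [PySem.List.enumerate_eq_map_pyRange cs 'A', ← List.map_reverse, List.foldl_map]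
  have hlen : PySem.List.len cs = (cs.length : Int) := by simp [PySem.List.len]
  rw [hlen]
  apply PySem.List.foldl_congr_mem
  intro acc x hx
  rw [List.mem_reverse] at hx
  rcases PySem.List.mem_pyRange_one.1 hx with ⟨h0, h1⟩
  obtain ⟨m, rfl⟩ : ∃ m : Nat, x = ↑m := ⟨x.toNat, by omega⟩
  have hm : m < cs.length := by exact_mod_cast h1
  rw [PySem.List.pyGet?_natCast, PySem.List.pyGetD_natCast]
  simp [List.getElem?_eq_getElem, hm, List.getD_eq_getElem?_getD]

/-- A's first loop: the final count is the total balance, and `fromLeft` is the last index whose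
    prefix closes the balance `b0`, with start offset `s` and default `r0`. -/
theorem pv_lemA1 (cs : List Char) (s b0 r0 : Int) :
    (PySem.List.enumerate cs s).foldl
      (fun (st : Int × Int) kc =>
        let count := if kc.2 = '0' then st.1 - 1 else st.1 + 1
        (count, if count = 0 then kc.1 else st.2)) (b0, r0)
    = (b0 + pvTotal cs,
       match pvLastZero? cs (-b0) with
       | some i => s + (i : Int)
       | none => r0) := by
  induction cs generalizing s b0 r0 with
  | nil => simp [PySem.List.enumerate_nil, pvTotal, pvLastZero?]
  | cons c cs ih =>
    rw [PySem.List.enumerate_cons, List.foldl_cons]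
    have hval : (if c = '0' then b0 - 1 else b0 + 1) = b0 + pvVal c := by
      by_cases h : c = '0' <;> simp [pvVal, h] <;> ring
    simp only [hval]
    rw [ih]
    have harg : -(b0 + pvVal c) = -b0 - pvVal c := by ring
    rw [harg]
    have htot : pvTotal (c :: cs) = pvVal c + pvTotal cs := by simp [pvTotal]
    rcases h : pvLastZero? cs (-b0 - pvVal c) with _ | j
    · simp only [pvLastZero?, h, htot, Prod.ext_iff]
      by_cases hz : b0 + pvVal c = 0
      · have hv : pvVal c = -b0 := by omega
        simp [hz, hv]
      · have hv : ¬ pvVal c = -b0 := by omega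
        simp [hz, hv]
        ring
    · simp only [pvLastZero?, h, htot, Prod.ext_iff]
      constructor
      · ring
      · push_cast; ring

/-- A's second loop (right to left): the final count is the total balance, and `fromRight` is the
    first index whose suffix is balanced, with start offset `s` and default `r0`. -/
theorem pv_lemA2 (cs : List Char) (s r0 : Int) :
    ((PySem.List.enumerate cs s).reverse).foldl
      (fun (st : Int × Int) kc =>
        let count := if kc.2 = '0' then st.1 - 1 else st.1 + 1
        (count, if count = 0 then kc.1 else st.2)) (0, r0)
    = (pvTotal cs,
       match pvSufIdx? cs with
       | some i => s + (i : Int)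
       | none => r0) := by
  induction cs generalizing s r0 with
  | nil => simp [PySem.List.enumerate_nil, pvTotal, pvSufIdx?]
  | cons c cs ih =>
    rw [PySem.List.enumerate_cons, List.reverse_cons, List.foldl_append, ih]
    have htot : pvTotal (c :: cs) = pvVal c + pvTotal cs := by simp [pvTotal]
    have hval : ∀ b : Int, (if c = '0' then b - 1 else b + 1) = b + pvVal c := by
      intro b; by_cases h : c = '0' <;> simp [pvVal, h] <;> ring
    rcases h : pvSufIdx? cs with _ | j
    · simp only [List.foldl_cons, List.foldl_nil, hval, htot, pvSufIdx?, h]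
      by_cases hz : pvVal c + pvTotal cs = 0
      · simp [hz, Prod.ext_iff]; omega
      · have : ¬ (pvTotal cs + pvVal c = 0) := by omega
        simp [hz, this, Prod.ext_iff]; omega
    · simp only [List.foldl_cons, List.foldl_nil, hval, htot, pvSufIdx?, h]
      by_cases hz : pvVal c + pvTotal cs = 0
      · have : pvTotal cs + pvVal c = 0 := by omega
        simp [hz, this]
      · have : ¬ (pvTotal cs + pvVal c = 0) := by omega
        simp [hz, this, Prod.ext_iff]
        constructor
        · ring
        · push_cast; ring

/-- B's loop: the final balance is `b0` plus the total balance. -/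
theorem pv_lemB_bal (cs : List Char) (s b0 p0 : Int) (d0 : PySem.Dict Int Int) :
    ((PySem.List.enumerate cs s).foldl pvBodyB (b0, d0, p0)).1 = b0 + pvTotal cs := by
  induction cs generalizing s b0 p0 d0 with
  | nil => simp [PySem.List.enumerate_nil, pvTotal]
  | cons c cs ih =>
    rw [PySem.List.enumerate_cons, List.foldl_cons]
    show ((PySem.List.enumerate cs (s+1)).foldl pvBodyB
      ((if c = '0' then b0 - 1 else b0 + 1), _, _)).1 = _
    rw [ih]
    have htot : pvTotal (c :: cs) = pvVal c + pvTotal cs := by simp [pvTotal]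
    rw [htot]
    by_cases h : c = '0'
    · simp [pvVal, h]; ring
    · simp [pvVal, h]; ring

/-- B's loop: `prefixLen` is one more than the last index whose prefix closes the balance `b0`. -/
theorem pv_lemB_plen (cs : List Char) (s b0 p0 : Int) (d0 : PySem.Dict Int Int) :
    ((PySem.List.enumerate cs s).foldl pvBodyB (b0, d0, p0)).2.2
    = (match pvLastZero? cs (-b0) with
       | some i => s + (i : Int) + 1
       | none => p0) := by
  induction cs generalizing s b0 p0 d0 with
  | nil => simp [PySem.List.enumerate_nil, pvLastZero?]
  | cons c cs ih =>
    rw [PySem.List.enumerate_cons, List.foldl_cons]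
    have hval : (if c = '0' then b0 - 1 else b0 + 1) = b0 + pvVal c := by
      by_cases h : c = '0' <;> simp [pvVal, h] <;> ring
    show ((PySem.List.enumerate cs (s+1)).foldl pvBodyB
      ((if c = '0' then b0 - 1 else b0 + 1), PySem.Dict.setdefault d0 b0 s,
       if (if c = '0' then b0 - 1 else b0 + 1) = 0 then s + 1 else p0)).2.2 = _
    rw [hval, ih]
    have harg : -(b0 + pvVal c) = -b0 - pvVal c := by ring
    rw [harg]
    rcases h : pvLastZero? cs (-b0 - pvVal c) with _ | j
    · simp only [pvLastZero?, h]
      by_cases hz : b0 + pvVal c = 0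
      · have hv : pvVal c = -b0 := by omega
        simp [hz, hv]
      · have hv : ¬ pvVal c = -b0 := by omega
        simp [hz, hv]
    · simp only [pvLastZero?, h]
      push_cast; ring

/-- B's dict after the loop: a lookup finds the first index whose prefix balance is the key
    (keys already present in `d0` keep their value, since `setdefault` never overwrites). -/
theorem pv_lemB_dict (cs : List Char) (s b0 p0 : Int) (d0 : PySem.Dict Int Int) (t dflt : Int) :
    PySem.Dict.getD ((PySem.List.enumerate cs s).foldl pvBodyB (b0, d0, p0)).2.1 t dflt
    = match PySem.Dict.get? d0 t with
      | some v => v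
      | none =>
        match pvFirstIdx? cs (t - b0) with
        | some k => s + (k : Int)
        | none => dflt := by
  induction cs generalizing s b0 p0 d0 with
  | nil =>
    simp only [PySem.List.enumerate_nil, List.foldl_nil, pvFirstIdx?]
    rw [PySem.Dict.getD_eq_get?_getD]
    rcases h : PySem.Dict.get? d0 t with _ | v <;> simp [h]
  | cons c cs ih =>
    rw [PySem.List.enumerate_cons, List.foldl_cons]
    show PySem.Dict.getD ((PySem.List.enumerate cs (s+1)).foldl pvBodyB
      ((if c = '0' then b0 - 1 else b0 + 1), PySem.Dict.setdefault d0 b0 s,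
       if (if c = '0' then b0 - 1 else b0 + 1) = 0 then s + 1 else p0)).2.1 t dflt = _
    rw [ih]
    have hval : (if c = '0' then b0 - 1 else b0 + 1) = b0 + pvVal c := by
      by_cases h : c = '0' <;> simp [pvVal, h] <;> ring
    rw [hval]
    by_cases ht : t = b0
    · subst ht
      rw [PySem.Dict.get?_setdefault_self d0 t s]
      rcases h0 : PySem.Dict.get? d0 t with _ | v
      · simp only [h0, Option.getD_none]
        have : t - t = 0 := by ring
        simp [pvFirstIdx?, this]
      · simp [h0]
    · rw [PySem.Dict.get?_setdefault_of_ne d0 s ht]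
      rcases h0 : PySem.Dict.get? d0 t with _ | v
      · simp only [h0]
        have hne : ¬ (t - b0 = 0) := by omega
        have harg : t - b0 - pvVal c = t - (b0 + pvVal c) := by ring
        simp only [pvFirstIdx?, hne, if_false, ← harg]
        rcases h1 : pvFirstIdx? cs (t - b0 - pvVal c) with _ | k
        · simp
        · simp; push_cast; ring
      · simp [h0]

-- ===== VERDICT (by name: the statement is the Claim_ definition above) =====
theorem longestSeq_spec : Claim_equal_longestSeq := by
  intro string _
  unfold Spec_longestSeq longestSeq longestSeq_alt
  have hA : (fun (st : Int × Int) i =>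
      let count := if PySem.Str.pyGet? string i = some '0' then st.1 - 1 else st.1 + 1
      (count, if count = 0 then i else st.2))
      = fun st i => pvBodyA st i (PySem.List.pyGet? string.toList i) := by
    funext st i; rfl
  have hA' : (fun (st : Int × Int) (kc : Int × Char) =>
      let count := if kc.2 = '0' then st.1 - 1 else st.1 + 1
      (count, if count = 0 then kc.1 else st.2))
      = fun st kc => pvBodyA st kc.1 (some kc.2) := by
    funext st kc; simp only [pvBodyA, Option.some.injEq]
  have hB : (fun (st : Int × PySem.Dict Int Int × Int) (kc : Int × Char) =>
      let first := PySem.Dict.setdefault st.2.1 st.1 kc.1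
      let bal := if kc.2 = '0' then st.1 - 1 else st.1 + 1
      (bal, first, if bal = 0 then kc.1 + 1 else st.2.2)) = pvBodyB := by
    funext st kc; rfl
  simp only [PySem.Str.len_eq, PySem.List.slice?_none_none_neg_one, Option.getD_some, hA, hB]
  rw [pv_fold_range_eq_enumerate, pv_fold_range_rev_eq_enumerate, ← hA', pv_lemA1, pv_lemA2,
      pv_lemB_bal, pv_lemB_plen, pv_lemB_dict]
  rw [pvSufIdx_eq_firstIdx_total]
  simp only [PySem.Dict.get?_empty, zero_add, sub_zero, neg_zero]
  rcases h1 : pvLastZero? string.toList 0 with _ | i <;>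
    rcases h2 : pvFirstIdx? string.toList (pvTotal string.toList) with _ | k <;> simp
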